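-- pv_equiv track=rewrite | github.com/yuhao-zhan/SEED-Bench | evaluation/result.py | _get_ordered_methods_by_category
-- ===== SOURCE A (Python) =====
-- def _get_ordered_methods_by_category(methods):
--     """Return methods ordered by METHOD_CATEGORIES, then any remaining."""
--     ordered = []
--     for cat_name in METHOD_CATEGORIES:
--         for m in METHOD_CATEGORIES[cat_name]:
--             if m in methods:
--                 ordered.append(m)
--     for m in methods:
--         if m not in ordered:
--             ordered.append(m)
--     return ordered
--
-- METHOD_CATEGORIES = {
--     'Context Evolution': ['baseline', 'sys_feedback', 'textgrad', 'reflexion', 'self_refine'],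
--     'Memory Evolution': ['ace', 'rememberer', 'expel', 'memento_nonparametric', 'reasoning_bank'],
--     'Inference-time Search': ['tree_of_thought', 'science_codeevolve', 'alpha_evolve'],
--     'Parameter Evolution': ['seal', 'ragen', 'genome', 'soar', 'theta_evolve', 'discover', 'absolute_zero_iter'],
-- }
-- ===== SOURCE B (Python) =====
-- METHOD_CATEGORIES = {
--     'Context Evolution': ['baseline', 'sys_feedback', 'textgrad', 'reflexion', 'self_refine'],
--     'Memory Evolution': ['ace', 'rememberer', 'expel', 'memento_nonparametric', 'reasoning_bank'],
--     'Inference-time Search': ['tree_of_thought', 'science_codeevolve', 'alpha_evolve'],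
--     'Parameter Evolution': ['seal', 'ragen', 'genome', 'soar', 'theta_evolve', 'discover', 'absolute_zero_iter'],
-- }
--
--
-- def _get_ordered_methods_by_category(methods):
--     """Rank-table + stable sort: predefined methods get their category-order
--     index, all others share the max key, so stable sort keeps their
--     first-appearance order."""
--     flat = [m for cat in METHOD_CATEGORIES.values() for m in cat]
--     rank = {m: i for i, m in enumerate(flat)}
--     deduped = list(dict.fromkeys(methods))
--     return sorted(deduped, key=lambda m: rank.get(m, len(flat)))
-- ===== Notes on version B (the rewrite author's own statement) =====
-- stated objective: faster
-- what changed: Replaces A's nested category scans and the quadratic 'm not in ordered' list-membership loop by building a rank table once, deduping the input with dict.fromkeys, and stably sorting by rank (unknown methods share the max key, so stable sort keeps their first-appearance order).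
import Mathlib
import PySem

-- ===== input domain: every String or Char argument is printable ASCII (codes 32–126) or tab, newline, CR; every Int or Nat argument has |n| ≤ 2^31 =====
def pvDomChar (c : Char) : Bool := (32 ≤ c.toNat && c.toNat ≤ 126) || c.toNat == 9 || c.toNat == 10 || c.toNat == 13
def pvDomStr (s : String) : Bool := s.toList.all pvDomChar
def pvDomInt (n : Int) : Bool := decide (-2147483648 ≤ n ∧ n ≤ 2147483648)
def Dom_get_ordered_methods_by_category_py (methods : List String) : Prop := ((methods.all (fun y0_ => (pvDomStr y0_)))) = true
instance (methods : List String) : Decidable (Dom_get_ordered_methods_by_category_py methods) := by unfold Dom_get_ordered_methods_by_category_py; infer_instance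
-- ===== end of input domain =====

-- B replaces A's nested membership-scan loops by a rank table + dedup + stable sort (alternative decomposition; same return value).

-- ===== PORT A =====
-- module constant METHOD_CATEGORIES (dict of category name -> method list)
def METHOD_CATEGORIES : PySem.Dict String (List String) :=
  ⟨[("Context Evolution", ["baseline", "sys_feedback", "textgrad", "reflexion", "self_refine"]),
   ("Memory Evolution", ["ace", "rememberer", "expel", "memento_nonparametric", "reasoning_bank"]),
   ("Inference-time Search", ["tree_of_thought", "science_codeevolve", "alpha_evolve"]),
   ("Parameter Evolution", ["seal", "ragen", "genome", "soar", "theta_evolve", "discover", "absolute_zero_iter"])]⟩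

def get_ordered_methods_by_category_py (methods : List String) : List String :=
  -- 'for cat_name in METHOD_CATEGORIES: for m in METHOD_CATEGORIES[cat_name]: ...'
  -- (getD is exact here: cat_name ranges over the dict's own keys, so the lookup never raises)
  let ordered : List String :=
    METHOD_CATEGORIES.keys.foldl (fun ordered cat_name =>
      (METHOD_CATEGORIES.getD cat_name []).foldl (fun ordered m =>
        if m ∈ methods then ordered ++ [m] else ordered) ordered) []
  -- 'for m in methods: if m not in ordered: ordered.append(m)'
  methods.foldl (fun ordered m => if m ∈ ordered then ordered else ordered ++ [m]) ordered

-- ===== PORT B =====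
-- flat = [m for cat in METHOD_CATEGORIES.values() for m in cat]
def pvFlat : List String := METHOD_CATEGORIES.values.flatMap (fun cat => cat)
-- rank = {m: i for i, m in enumerate(flat)}
def pvRank : PySem.Dict String Int :=
  (PySem.List.enumerate pvFlat).foldl (fun d p => d.insert p.2 p.1) PySem.Dict.empty

def get_ordered_methods_by_category_py_alt (methods : List String) : List String :=
  -- deduped = list(dict.fromkeys(methods)); sorted(deduped, key=lambda m: rank.get(m, len(flat)))
  let deduped := PySem.List.dedup methods
  PySem.List.sorted deduped (fun m => pvRank.getD m (pvFlat.length : Int)) false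

-- ===== PRECONDITION & SPEC =====
def Spec_get_ordered_methods_by_category_py (methods : List String) (out : List String) : Prop := out = get_ordered_methods_by_category_py_alt methods
instance (methods : List String) (out : List String) : Decidable (Spec_get_ordered_methods_by_category_py methods out) := by unfold Spec_get_ordered_methods_by_category_py; infer_instance

-- ===== CLAIM (what is proved, stated in full; the proofs are below) =====
def Claim_equal_get_ordered_methods_by_category_py : Prop := ∀ (methods : List String), Dom_get_ordered_methods_by_category_py methods → Spec_get_ordered_methods_by_category_py methods (get_ordered_methods_by_category_py methods)

-- ===== LEMMAS AND PROOFS =====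

-- the sort key of port B, as a named function
def pvKey (m : String) : Int := pvRank.getD m (pvFlat.length : Int)

-- the common normal form both ports are reduced to
def pvNF (methods : List String) : List String :=
  pvFlat.filter (fun y => decide (y ∈ methods)) ++
    PySem.List.dedup (methods.filter (fun y => !decide (y ∈ pvFlat)))

-- ---- facts about the concrete key table ----
lemma pvKey_lt_of_mem : ∀ x ∈ pvFlat, pvKey x < 20 := by decide

lemma pvFlat_nodup : pvFlat.Nodup := by decide

lemma pvFlat_pairwise : pvFlat.Pairwise (fun a b => pvKey a < pvKey b) := by decide

lemma pvKey_of_not_mem (x : String) (h : x ∉ pvFlat) : pvKey x = 20 := by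
  have hk : pvRank.keys = pvFlat := by decide
  have hn : pvRank.get? x = none :=
    (PySem.Dict.get?_eq_none_iff_not_mem_keys pvRank x).mpr (by rw [hk]; exact h)
  show (pvRank.get? x).getD (pvFlat.length : Int) = 20
  rw [hn]
  rfl

lemma pvKey_le (x : String) : pvKey x ≤ 20 := by
  by_cases h : x ∈ pvFlat
  · exact le_of_lt (pvKey_lt_of_mem x h)
  · exact le_of_eq (pvKey_of_not_mem x h)

-- ---- small structural facts about insertBy ----
lemma insertBy_cons_true {α : Type} (bef : α → α → Bool) (x y : α) (ys : List α)
    (h : bef x y = true) : PySem.List.insertBy bef x (y :: ys) = x :: y :: ys := by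
  simp [PySem.List.insertBy, h]

lemma insertBy_cons_false {α : Type} (bef : α → α → Bool) (x y : α) (ys : List α)
    (h : bef x y = false) : PySem.List.insertBy bef x (y :: ys) = y :: PySem.List.insertBy bef x ys := by
  simp [PySem.List.insertBy, h]

lemma insertBy_forall_before {α : Type} (bef : α → α → Bool) (x : α) (ys : List α)
    (h : ∀ y ∈ ys, bef x y = true) : PySem.List.insertBy bef x ys = x :: ys := by
  cases ys with
  | nil => rfl
  | cons y t => exact insertBy_cons_true bef x y t (h y (List.mem_cons_self))

-- inserting a FLAT element into (sorted-prefix ++ big-key tail) lands at its rank position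
lemma insertBy_filter_gen (k : String → Int) (x : String) :
    ∀ (L p T : List String), x ∈ L → x ∉ p → L.Nodup →
      L.Pairwise (fun a b => k a < k b) → (∀ y ∈ T, k x < k y) →
      PySem.List.insertBy (fun a b => decide (k a < k b)) x
          (L.filter (fun y => decide (y ∈ p)) ++ T)
        = L.filter (fun y => decide (y ∈ p ++ [x])) ++ T := by
  intro L
  induction L with
  | nil => intro p T hx; simp at hx
  | cons a L ih =>
    intro p T hx hxp hnd hpw hT
    have ha : a ∉ L := (List.nodup_cons.mp hnd).1
    have hnd' : L.Nodup := (List.nodup_cons.mp hnd).2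
    have hpa : ∀ y ∈ L, k a < k y := (List.pairwise_cons.mp hpw).1
    have hpw' : L.Pairwise (fun a b => k a < k b) := (List.pairwise_cons.mp hpw).2
    rcases List.mem_cons.mp hx with rfl | hxL
    · -- x is the head of L
      have hxa : decide (x ∈ p) = false := by simp [hxp]
      rw [List.filter_cons, List.filter_cons]
      simp only [hxa, Bool.false_eq_true, if_false]
      have : decide (x ∈ p ++ [x]) = true := by simp
      simp only [this, if_true]
      rw [insertBy_forall_before]
      · have hfc : L.filter (fun y => decide (y ∈ p)) = L.filter (fun y => decide (y ∈ p ++ [x])) := by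
          apply List.filter_congr
          intro y hy
          have : y ≠ x := fun hcon => ha (hcon ▸ hy)
          simp [this]
        rw [hfc, List.cons_append]
      · intro y hy
        rcases List.mem_append.mp hy with hy1 | hy2
        · exact decide_eq_true (hpa y (List.mem_of_mem_filter hy1))
        · exact decide_eq_true (hT y hy2)
    · -- x is deeper in L
      have hxa : x ≠ a := fun hcon => ha (hcon ▸ hxL)
      have hka : k a < k x := hpa x hxL
      by_cases hap : a ∈ p
      · rw [List.filter_cons, List.filter_cons]
        have h1 : decide (a ∈ p) = true := by simp [hap]
        have h2 : decide (a ∈ p ++ [x]) = true := by simp [hap]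
        simp only [h1, h2, if_true]
        rw [List.cons_append, insertBy_cons_false]
        · rw [ih p T hxL hxp hnd' hpw' hT, List.cons_append]
        · simp; omega
      · rw [List.filter_cons, List.filter_cons]
        have h1 : decide (a ∈ p) = false := by simp [hap]
        have h2 : decide (a ∈ p ++ [x]) = false := by simp [hap, hxa.symm]
        simp only [h1, h2, Bool.false_eq_true, if_false]
        exact ih p T hxL hxp hnd' hpw' hT

-- the insertion-sort fold of port B computes the normal form
lemma sortfold (ys : List String) (h : ys.Nodup) :
    ys.foldl (fun acc y => PySem.List.insertBy (fun a b => decide (pvKey a < pvKey b)) y acc) []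
      = pvFlat.filter (fun y => decide (y ∈ ys)) ++ ys.filter (fun y => !decide (y ∈ pvFlat)) := by
  induction ys using List.reverseRecOn with
  | nil => simp
  | append_singleton p x ih =>
    have hnd : p.Nodup := (List.nodup_append.mp h).1
    have hxp : x ∉ p := by
      have hd := (List.nodup_append.mp h).2.2
      intro hc
      exact absurd rfl (hd x hc x (by simp))
    rw [List.foldl_append, ih hnd]
    simp only [List.foldl_cons, List.foldl_nil]
    by_cases hm : x ∈ pvFlat
    · have hT : ∀ y ∈ p.filter (fun y => !decide (y ∈ pvFlat)), pvKey x < pvKey y := by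
        intro y hy
        have hyn : y ∉ pvFlat := by
          have := List.of_mem_filter hy; simpa using this
        rw [pvKey_of_not_mem y hyn]
        exact pvKey_lt_of_mem x hm
      rw [insertBy_filter_gen pvKey x pvFlat p _ hm hxp pvFlat_nodup pvFlat_pairwise hT]
      have htail : (p ++ [x]).filter (fun y => !decide (y ∈ pvFlat)) = p.filter (fun y => !decide (y ∈ pvFlat)) := by
        simp [List.filter_append, hm]
      rw [htail]
    · rw [PySem.List.insertBy_of_forall_not_before]
      · have hhead : pvFlat.filter (fun y => decide (y ∈ p ++ [x])) = pvFlat.filter (fun y => decide (y ∈ p)) := by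
          apply List.filter_congr
          intro y hy
          have : y ≠ x := fun hc => hm (hc ▸ hy)
          simp [this]
        have htail : (p ++ [x]).filter (fun y => !decide (y ∈ pvFlat)) = p.filter (fun y => !decide (y ∈ pvFlat)) ++ [x] := by
          simp [List.filter_append, hm]
        rw [hhead, htail, List.append_assoc]
      · intro y hy
        have hx20 : pvKey x = 20 := pvKey_of_not_mem x hm
        have hy20 : pvKey y ≤ 20 := pvKey_le y
        simp; omega

-- ---- dedup (= Set.ofList) algebra used on both sides ----
lemma foldl_add_cons (l : List String) :
    ∀ (m : String) (s : List String),
      l.foldl PySem.Set.add (m :: s)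
        = m :: (l.filter (fun y => !(y == m))).foldl PySem.Set.add s := by
  induction l with
  | nil => intro m s; simp
  | cons y l ih =>
    intro m s
    by_cases hy : y = m
    · subst hy
      simp [ih]
    · have hby : (y == m) = false := by simp [hy]
      by_cases hs : y ∈ s
      · have h1 : PySem.Set.add (m :: s) y = m :: s := by
          simp [PySem.Set.add, hs]
        have h2 : PySem.Set.add s y = s := by simp [PySem.Set.add, hs]
        simp [h1, hby, h2, ih]
      · have h1 : PySem.Set.add (m :: s) y = m :: (s ++ [y]) := by
          simp [PySem.Set.add, hs, hy]
        have h2 : PySem.Set.add s y = s ++ [y] := by simp [PySem.Set.add, hs]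
        simp [h1, hby, h2, ih]

lemma dedup_cons (m : String) (l : List String) :
    PySem.List.dedup (m :: l) = m :: PySem.List.dedup (l.filter (fun y => !(y == m))) := by
  rw [PySem.List.dedup_eq_ofList, PySem.List.dedup_eq_ofList]
  show (m :: l).foldl PySem.Set.add PySem.Set.empty = _
  rw [List.foldl_cons]
  have : PySem.Set.add PySem.Set.empty m = [m] := by simp [PySem.Set.add, PySem.Set.empty]
  rw [this]
  exact foldl_add_cons l m []

lemma foldl_add_filter (l : List String) :
    ∀ (t : List String) (q : String → Bool),
      (l.filter q).foldl PySem.Set.add (t.filter q)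
        = ((l.foldl PySem.Set.add t).filter q) := by
  induction l with
  | nil => intro t q; simp
  | cons y l ih =>
    intro t q
    by_cases hq : q y
    · rw [List.filter_cons_of_pos (by simp [hq]), List.foldl_cons, List.foldl_cons]
      have hstep : PySem.Set.add (t.filter q) y = (PySem.Set.add t y).filter q := by
        by_cases ht : y ∈ t <;>
          simp [PySem.Set.add, List.mem_filter, ht, hq, List.filter_append]
      rw [hstep, ih]
    · have hq' : q y = false := by simpa using hq
      rw [List.filter_cons_of_neg (by simp [hq']), List.foldl_cons]
      have hstep : t.filter q = (PySem.Set.add t y).filter q := by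
        by_cases ht : y ∈ t <;>
          simp [PySem.Set.add, ht, List.filter_append, hq']
      rw [hstep, ih]

lemma dedup_filter (l : List String) (q : String → Bool) :
    PySem.List.dedup (l.filter q) = (PySem.List.dedup l).filter q := by
  rw [PySem.List.dedup_eq_ofList, PySem.List.dedup_eq_ofList]
  show (l.filter q).foldl PySem.Set.add PySem.Set.empty = _
  have : (PySem.Set.empty : List String) = ([] : List String).filter q := rfl
  rw [this]
  exact foldl_add_filter l [] q

-- ---- port A reduced to the normal form ----
lemma part1_eq (methods : List String) :
    METHOD_CATEGORIES.keys.foldl (fun ordered cat_name =>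
        (METHOD_CATEGORIES.getD cat_name []).foldl (fun ordered m =>
          if m ∈ methods then ordered ++ [m] else ordered) ordered) []
      = pvFlat.filter (fun y => decide (y ∈ methods)) := by
  have key : ∀ (l acc : List String),
      l.foldl (fun ordered m => if m ∈ methods then ordered ++ [m] else ordered) acc
        = acc ++ l.filter (fun y => decide (y ∈ methods)) := by
    intro l acc
    simpa using PySem.List.foldl_append_if (fun m => decide (m ∈ methods)) (fun m => m) l acc
  have hkeys : METHOD_CATEGORIES.keys =
      ["Context Evolution", "Memory Evolution", "Inference-time Search", "Parameter Evolution"] := by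
    decide
  have g1 : METHOD_CATEGORIES.getD "Context Evolution" [] =
      ["baseline", "sys_feedback", "textgrad", "reflexion", "self_refine"] := by decide
  have g2 : METHOD_CATEGORIES.getD "Memory Evolution" [] =
      ["ace", "rememberer", "expel", "memento_nonparametric", "reasoning_bank"] := by decide
  have g3 : METHOD_CATEGORIES.getD "Inference-time Search" [] =
      ["tree_of_thought", "science_codeevolve", "alpha_evolve"] := by decide
  have g4 : METHOD_CATEGORIES.getD "Parameter Evolution" [] =
      ["seal", "ragen", "genome", "soar", "theta_evolve", "discover", "absolute_zero_iter"] := by decide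
  rw [hkeys]
  simp only [List.foldl_cons, List.foldl_nil, g1, g2, g3, g4, key]
  simp only [pvFlat, METHOD_CATEGORIES, PySem.Dict.values_mk, List.map_cons, List.map_nil,
    List.flatMap_cons, List.flatMap_nil, List.nil_append, List.append_nil,
    ← List.filter_append]
  rfl

lemma foldl_dedup_acc (xs : List String) :
    ∀ acc : List String,
      xs.foldl (fun a m => if m ∈ a then a else a ++ [m]) acc
        = acc ++ PySem.List.dedup (xs.filter (fun y => !decide (y ∈ acc))) := by
  induction xs with
  | nil =>
    intro acc
    simp [PySem.List.dedup, PySem.Set.ofList, PySem.Set.empty]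
  | cons m xs ih =>
    intro acc
    rw [List.foldl_cons]
    by_cases hm : m ∈ acc
    · rw [if_pos hm, ih]
      have h0 : (m :: xs).filter (fun y => !decide (y ∈ acc)) = xs.filter (fun y => !decide (y ∈ acc)) := by
        rw [List.filter_cons_of_neg]; simp [hm]
      rw [h0]
    · rw [if_neg hm, ih]
      have h1 : (m :: xs).filter (fun y => !decide (y ∈ acc)) = m :: xs.filter (fun y => !decide (y ∈ acc)) := by
        rw [List.filter_cons_of_pos]; simp [hm]
      rw [h1, dedup_cons]
      have h2 : (xs.filter (fun y => !decide (y ∈ acc))).filter (fun y => !(y == m))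
          = xs.filter (fun y => !decide (y ∈ acc ++ [m])) := by
        rw [List.filter_filter]
        apply List.filter_congr
        intro y _
        by_cases hy : y = m <;> simp [hy, List.mem_append]
      rw [h2]
      simp [List.append_assoc]

lemma A_eq (methods : List String) :
    get_ordered_methods_by_category_py methods = pvNF methods := by
  unfold get_ordered_methods_by_category_py pvNF
  rw [part1_eq, foldl_dedup_acc]
  have h : methods.filter (fun y => !decide (y ∈ pvFlat.filter (fun y => decide (y ∈ methods))))
      = methods.filter (fun y => !decide (y ∈ pvFlat)) := by
    apply List.filter_congr
    intro y hy
    simp [List.mem_filter, hy]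
  rw [h]

lemma B_eq (methods : List String) :
    get_ordered_methods_by_category_py_alt methods = pvNF methods := by
  unfold get_ordered_methods_by_category_py_alt pvNF
  rw [PySem.List.sorted_eq_foldl_insertBy]
  show (PySem.List.dedup methods).foldl
      (fun acc y => PySem.List.insertBy (fun a b => decide (pvKey a < pvKey b)) y acc) [] = _
  rw [sortfold _ (PySem.List.nodup_dedup methods)]
  have h1 : pvFlat.filter (fun y => decide (y ∈ PySem.List.dedup methods))
      = pvFlat.filter (fun y => decide (y ∈ methods)) := by
    apply List.filter_congr
    intro y _
    simp
  rw [h1, dedup_filter]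

-- ===== VERDICT (by name: the statement is the Claim_ definition above) =====
theorem get_ordered_methods_by_category_py_spec : Claim_equal_get_ordered_methods_by_category_py := by
  intro methods _
  unfold Spec_get_ordered_methods_by_category_py
  rw [A_eq, B_eq]
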